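-- pv_equiv track=rewrite | github.com/elixirofearth/FourColourTheoremSolver | server/solver-service/tests/test_utils.py | validate_four_color_theorem
-- ===== SOURCE A (Python) =====
-- def validate_four_color_theorem(colored_map, adjacency_info=None):
--     """Validate that the coloring satisfies the four-color theorem"""
--     height = len(colored_map)
--     if height == 0:
--         return True
--
--     width = len(colored_map[0])
--
--     # Create color map for easy comparison
--     color_map = {}
--     for y in range(height):
--         for x in range(width):
--             color = tuple(int(c) for c in colored_map[y][x])
--             color_map[(x, y)] = color
--
--     # Check adjacent pixels don't have the same color (excluding black borders)
--     for y in range(height):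
--         for x in range(width):
--             current_color = color_map[(x, y)]
--
--             # Skip black pixels (borders)
--             if current_color == (0, 0, 0):
--                 continue
--
--             # Check 4-connected neighbors
--             neighbors = [(x - 1, y), (x + 1, y), (x, y - 1), (x, y + 1)]
--
--             for nx, ny in neighbors:
--                 if 0 <= nx < width and 0 <= ny < height:
--                     neighbor_color = color_map[(nx, ny)]
--
--                     # Skip black pixels (borders)
--                     if neighbor_color == (0, 0, 0):
--                         continue
--
--                     # Adjacent non-border pixels should have different colors
--                     if current_color == neighbor_color:
--                         return False
--
--     return True
-- ===== SOURCE B (Python) =====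
-- def validate_four_color_theorem(colored_map, adjacency_info=None):
--     """Validate that the coloring satisfies the four-color theorem"""
--     if len(colored_map) == 0:
--         return True
--     width = len(colored_map[0])
--
--     # Index every non-black pixel as a (color, x, y) triple in one hash set.
--     colored = set()
--     for y in range(len(colored_map)):
--         for x in range(width):
--             color = tuple(int(c) for c in colored_map[y][x])
--             if color != (0, 0, 0):
--                 colored.add((color, x, y))
--
--     # Valid iff no indexed pixel has a same-colored right or down neighbour:
--     # each adjacent pair is decided once, by membership queries on the index.
--     return all((c, x + 1, y) not in colored and (c, x, y + 1) not in colored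
--                for (c, x, y) in colored)
-- ===== Notes on version B (the rewrite author's own statement) =====
-- stated objective: alternative
-- what changed: Drops the coordinate-keyed dict and the per-pixel 4-neighbour scan; instead builds a hash-set index of (color, x, y) triples for the non-black pixels and validates by membership queries: for each indexed pixel, the same-colored right and down neighbour must be absent from the index.
import Mathlib
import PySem

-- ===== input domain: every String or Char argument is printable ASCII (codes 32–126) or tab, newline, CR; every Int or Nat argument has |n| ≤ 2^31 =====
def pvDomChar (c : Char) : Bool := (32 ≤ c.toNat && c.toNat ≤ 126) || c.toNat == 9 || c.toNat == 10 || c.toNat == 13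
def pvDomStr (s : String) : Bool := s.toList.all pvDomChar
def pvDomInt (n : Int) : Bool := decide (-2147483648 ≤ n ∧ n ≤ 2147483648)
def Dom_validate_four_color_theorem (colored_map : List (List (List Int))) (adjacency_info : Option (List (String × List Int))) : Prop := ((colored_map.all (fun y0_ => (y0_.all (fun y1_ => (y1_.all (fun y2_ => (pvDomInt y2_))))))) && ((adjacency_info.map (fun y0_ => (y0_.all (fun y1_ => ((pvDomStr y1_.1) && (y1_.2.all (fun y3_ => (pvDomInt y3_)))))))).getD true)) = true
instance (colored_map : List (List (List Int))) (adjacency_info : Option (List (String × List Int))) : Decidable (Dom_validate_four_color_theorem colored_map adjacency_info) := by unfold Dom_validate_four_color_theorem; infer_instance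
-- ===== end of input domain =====

-- B replaces A's coordinate-keyed dict and per-pixel 4-neighbour scan by a hash-set
-- index of (color, x, y) triples for the non-black pixels, validated by membership
-- queries for each indexed pixel's right and down neighbour (objective: alternative).

-- ===== PORT A =====
-- colored_map[y][x] is read with pyGetD (default []): under Pre_ every such index is in
-- range, so the default is never produced; where Python would raise IndexError
-- (a row shorter than the first row) the input is outside Pre_.
def validate_four_color_theorem (colored_map : List (List (List Int))) (adjacency_info : Option (List (String × List Int))) : Bool :=
  let height : Int := colored_map.length
  if height = 0 then true
  else
    let width : Int := (PySem.List.pyGetD colored_map 0 []).length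
    -- color = tuple(int(c) for c in colored_map[y][x]) : int() is the identity on ints,
    -- so the stored color is the pixel list itself
    let color_map : PySem.Dict (Int × Int) (List Int) :=
      (PySem.List.pyRange 0 height 1).foldl (fun d y =>
        (PySem.List.pyRange 0 width 1).foldl (fun d x =>
          d.insert (x, y) (PySem.List.pyGetD (PySem.List.pyGetD colored_map y []) x [])) d)
        PySem.Dict.empty
    -- the early 'return False' loops become nested .all
    (PySem.List.pyRange 0 height 1).all (fun y =>
      (PySem.List.pyRange 0 width 1).all (fun x =>
        let current_color := color_map.getD (x, y) []
        if current_color = [0, 0, 0] then true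
        else
          [(x - 1, y), (x + 1, y), (x, y - 1), (x, y + 1)].all (fun n =>
            if 0 ≤ n.1 ∧ n.1 < width ∧ 0 ≤ n.2 ∧ n.2 < height then
              let neighbor_color := color_map.getD n []
              if neighbor_color = [0, 0, 0] then true
              else !decide (current_color = neighbor_color)
            else true)))

-- ===== PORT B =====
-- the set 'colored' is consumed only by 'all' over order-independent conditions,
-- so iterating it in its list order is exact
def validate_four_color_theorem_alt (colored_map : List (List (List Int))) (adjacency_info : Option (List (String × List Int))) : Bool :=
  if colored_map.length = 0 then true
  else
    let width : Int := (PySem.List.pyGetD colored_map 0 []).length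
    let colored : PySem.Set (List Int × Int × Int) :=
      (PySem.List.pyRange 0 (colored_map.length : Int) 1).foldl (fun s y =>
        (PySem.List.pyRange 0 width 1).foldl (fun s x =>
          let color := PySem.List.pyGetD (PySem.List.pyGetD colored_map y []) x []
          if color = [0, 0, 0] then s else PySem.Set.add s (color, x, y)) s)
        PySem.Set.empty
    colored.all (fun t =>
      !(PySem.Set.contains colored (t.1, t.2.1 + 1, t.2.2)) &&
      !(PySem.Set.contains colored (t.1, t.2.1, t.2.2 + 1)))

-- ===== PRECONDITION & SPEC =====
-- Pre_ excludes exactly the inputs on which A raises IndexError: ragged maps in which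
-- some row is shorter than the first row (A indexes every row up to len(colored_map[0])).
def Pre_validate_four_color_theorem (colored_map : List (List (List Int))) (adjacency_info : Option (List (String × List Int))) : Prop :=
  ∀ row ∈ colored_map, (colored_map.headD []).length ≤ row.length
instance (colored_map : List (List (List Int))) (adjacency_info : Option (List (String × List Int))) : Decidable (Pre_validate_four_color_theorem colored_map adjacency_info) := by unfold Pre_validate_four_color_theorem; infer_instance

def pvWitness_validate_four_color_theorem : List (List (List Int)) × (Option (List (String × List Int))) :=
  ([[[1, 2, 3], [0, 0, 0]], [[4, 5, 6], [1, 2, 3]]], none)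

def Spec_validate_four_color_theorem (colored_map : List (List (List Int))) (adjacency_info : Option (List (String × List Int))) (out : Bool) : Prop := out = validate_four_color_theorem_alt colored_map adjacency_info
instance (colored_map : List (List (List Int))) (adjacency_info : Option (List (String × List Int))) (out : Bool) : Decidable (Spec_validate_four_color_theorem colored_map adjacency_info out) := by unfold Spec_validate_four_color_theorem; infer_instance

-- ===== CLAIM (what is proved, stated in full; the proofs are below) =====
def Claim_equal_validate_four_color_theorem : Prop := ∀ (colored_map : List (List (List Int))) (adjacency_info : Option (List (String × List Int))), Dom_validate_four_color_theorem colored_map adjacency_info → Pre_validate_four_color_theorem colored_map adjacency_info → Spec_validate_four_color_theorem colored_map adjacency_info (validate_four_color_theorem colored_map adjacency_info)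

-- ===== LEMMAS AND PROOFS =====

-- pixel access used by the intermediate specifications (total, Nat-indexed)
def pvPixN (m : List (List (List Int))) (y x : Nat) : List Int := (m.getD y []).getD x []

def pvGoodP (a b : List Int) : Prop := a = [0, 0, 0] ∨ b = [0, 0, 0] ∨ a ≠ b

-- no horizontally adjacent bad pair
def pvPropH (m : List (List (List Int))) (w : Nat) : Prop :=
  ∀ y < m.length, ∀ x : Nat, x + 1 < w → pvGoodP (pvPixN m y x) (pvPixN m y (x + 1))
-- no vertically adjacent bad pair
def pvPropV (m : List (List (List Int))) (w : Nat) : Prop :=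
  ∀ y : Nat, y + 1 < m.length → ∀ x < w, pvGoodP (pvPixN m y x) (pvPixN m (y + 1) x)

-- A's per-pixel 4-neighbour condition, Nat-indexed
def pvPropA (m : List (List (List Int))) (w : Nat) : Prop :=
  ∀ y < m.length, ∀ x < w, pvPixN m y x ≠ [0, 0, 0] →
    (0 < x → pvPixN m y (x - 1) = [0, 0, 0] ∨ pvPixN m y x ≠ pvPixN m y (x - 1)) ∧
    (x + 1 < w → pvPixN m y (x + 1) = [0, 0, 0] ∨ pvPixN m y x ≠ pvPixN m y (x + 1)) ∧
    (0 < y → pvPixN m (y - 1) x = [0, 0, 0] ∨ pvPixN m y x ≠ pvPixN m (y - 1) x) ∧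
    (y + 1 < m.length → pvPixN m (y + 1) x = [0, 0, 0] ∨ pvPixN m y x ≠ pvPixN m (y + 1) x)

-- B's index-membership predicate: t is a non-black pixel triple of the map
def pvMemT (m : List (List (List Int))) (w : Nat) (t : List Int × Int × Int) : Prop :=
  ∃ yn xn : Nat, yn < m.length ∧ xn < w ∧ pvPixN m yn xn ≠ [0, 0, 0] ∧
    t = (pvPixN m yn xn, (xn : Int), (yn : Int))

lemma pvGetD_rowfold (l : List Int) (y : Int) (f : Int → List Int)
    (d : PySem.Dict (Int × Int) (List Int)) (q : Int × Int) :
    (l.foldl (fun d x => d.insert (x, y) (f x)) d).getD q [] =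
      if q.2 = y ∧ q.1 ∈ l then f q.1 else d.getD q [] := by
  induction l generalizing d with
  | nil => simp
  | cons a t ih =>
    obtain ⟨qx, qy⟩ := q
    simp only [List.foldl_cons, ih, PySem.Dict.getD_insert, List.mem_cons]
    by_cases h1 : qy = y <;> by_cases h2 : qx ∈ t <;> by_cases h3 : qx = a <;>
      simp_all [Prod.ext_iff]

lemma pvGetD_buildfold (ys xs : List Int) (F : Int → Int → List Int)
    (d : PySem.Dict (Int × Int) (List Int)) (q : Int × Int) :
    (ys.foldl (fun d y => xs.foldl (fun d x => d.insert (x, y) (F y x)) d) d).getD q [] =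
      if q.2 ∈ ys ∧ q.1 ∈ xs then F q.2 q.1 else d.getD q [] := by
  induction ys generalizing d with
  | nil => simp
  | cons y t ih =>
    simp only [List.foldl_cons, ih, pvGetD_rowfold, List.mem_cons]
    by_cases h1 : q.2 ∈ t <;> by_cases h2 : q.1 ∈ xs <;> by_cases h3 : q.2 = y <;> simp_all

lemma pvPix_eq_pixN (m : List (List (List Int))) (y x : Int) (hy : 0 ≤ y) (hx : 0 ≤ x) :
    PySem.List.pyGetD (PySem.List.pyGetD m y []) x [] = pvPixN m y.toNat x.toNat := by
  rw [PySem.List.pyGetD_of_nonneg _ _ hy, PySem.List.pyGetD_of_nonneg _ _ hx, pvPixN]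

-- membership in one row's fold of the set index
lemma pvMem_rowfold (l : List Int) (y : Int) (f : Int → List Int)
    (s : PySem.Set (List Int × Int × Int)) (t : List Int × Int × Int) :
    (t ∈ l.foldl (fun s x => if f x = [0, 0, 0] then s else PySem.Set.add s (f x, x, y)) s) ↔
      t ∈ s ∨ ∃ x ∈ l, f x ≠ [0, 0, 0] ∧ t = (f x, x, y) := by
  induction l generalizing s with
  | nil => simp
  | cons a r ih =>
    simp only [List.foldl_cons, List.mem_cons]
    by_cases h : f a = [0, 0, 0]
    · rw [if_pos h, ih]
      constructor
      · rintro (hs | ⟨x, hx, hne, rfl⟩)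
        · exact Or.inl hs
        · exact Or.inr ⟨x, Or.inr hx, hne, rfl⟩
      · rintro (hs | ⟨x, (rfl | hx), hne, rfl⟩)
        · exact Or.inl hs
        · exact absurd h hne
        · exact Or.inr ⟨x, hx, hne, rfl⟩
    · rw [if_neg h, ih]
      simp only [PySem.Set.mem_add]
      constructor
      · rintro ((hs | rfl) | ⟨x, hx, hne, rfl⟩)
        · exact Or.inl hs
        · exact Or.inr ⟨a, Or.inl rfl, h, rfl⟩
        · exact Or.inr ⟨x, Or.inr hx, hne, rfl⟩
      · rintro (hs | ⟨x, (rfl | hx), hne, rfl⟩)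
        · exact Or.inl (Or.inl hs)
        · exact Or.inl (Or.inr rfl)
        · exact Or.inr ⟨x, hx, hne, rfl⟩

-- membership in the whole nested fold
lemma pvMem_buildfold (ys xs : List Int) (F : Int → Int → List Int)
    (s : PySem.Set (List Int × Int × Int)) (t : List Int × Int × Int) :
    (t ∈ ys.foldl (fun s y =>
        xs.foldl (fun s x => if F y x = [0, 0, 0] then s else PySem.Set.add s (F y x, x, y)) s) s) ↔
      t ∈ s ∨ ∃ y ∈ ys, ∃ x ∈ xs, F y x ≠ [0, 0, 0] ∧ t = (F y x, x, y) := by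
  induction ys generalizing s with
  | nil => simp
  | cons y r ih =>
    simp only [List.foldl_cons, List.mem_cons, ih, pvMem_rowfold]
    constructor
    · rintro ((hs | ⟨x, hx, hne, rfl⟩) | ⟨y', hy', x, hx, hne, rfl⟩)
      · exact Or.inl hs
      · exact Or.inr ⟨y, Or.inl rfl, x, hx, hne, rfl⟩
      · exact Or.inr ⟨y', Or.inr hy', x, hx, hne, rfl⟩
    · rintro (hs | ⟨y', (rfl | hy'), x, hx, hne, rfl⟩)
      · exact Or.inl (Or.inl hs)
      · exact Or.inl (Or.inr ⟨x, hx, hne, rfl⟩)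
      · exact Or.inr ⟨y', hy', x, hx, hne, rfl⟩

-- the built index contains exactly the non-black pixel triples
lemma pvMem_colored (r0 : List (List Int)) (rest : List (List (List Int)))
    (t : List Int × Int × Int) :
    (t ∈ (PySem.List.pyRange 0 ((r0 :: rest).length : Int) 1).foldl (fun s y =>
        (PySem.List.pyRange 0 ((r0 : List (List Int)).length : Int) 1).foldl (fun s x =>
          let color := PySem.List.pyGetD (PySem.List.pyGetD (r0 :: rest) y []) x []
          if color = [0, 0, 0] then s else PySem.Set.add s (color, x, y)) s)
        PySem.Set.empty) ↔ pvMemT (r0 :: rest) r0.length t := by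
  rw [pvMem_buildfold]
  simp only [PySem.Set.empty, List.not_mem_nil, false_or, PySem.List.mem_pyRange_one]
  constructor
  · rintro ⟨y, ⟨hy0, hyh⟩, x, ⟨hx0, hxw⟩, hne, rfl⟩
    refine ⟨y.toNat, x.toNat, ?_, ?_, ?_, ?_⟩
    · omega
    · omega
    · rwa [pvPix_eq_pixN _ _ _ hy0 hx0] at hne
    · rw [pvPix_eq_pixN _ _ _ hy0 hx0]
      congr 2 <;> omega
  · rintro ⟨yn, xn, hyh, hxw, hne, rfl⟩
    refine ⟨(yn : Int), ⟨by omega, by exact_mod_cast hyh⟩,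
      (xn : Int), ⟨by omega, by exact_mod_cast hxw⟩, ?_, ?_⟩
    · rwa [pvPix_eq_pixN _ _ _ (by omega) (by omega), Int.toNat_natCast, Int.toNat_natCast]
    · rw [pvPix_eq_pixN _ _ _ (by omega) (by omega), Int.toNat_natCast, Int.toNat_natCast]

lemma pvA_iff (r0 : List (List Int)) (rest : List (List (List Int)))
    (adj : Option (List (String × List Int)))
    (hpre : Pre_validate_four_color_theorem (r0 :: rest) adj) :
    (validate_four_color_theorem (r0 :: rest) adj = true ↔
      pvPropA (r0 :: rest) r0.length) := by
  have hh : ((r0 :: rest).length : Int) ≠ 0 := Int.natCast_ne_zero.mpr (by simp)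
  simp only [validate_four_color_theorem]
  rw [if_neg hh]
  simp only [PySem.List.pyGetD_ofNat', List.getD_cons_zero, pvGetD_buildfold,
    PySem.Dict.getD_empty, PySem.List.mem_pyRange_one, List.all_cons, List.all_nil,
    List.all_eq_true]
  constructor
  · intro H yn hyn xn hxn hb
    have hyI : (0:Int) ≤ ↑yn ∧ (↑yn:Int) < ↑(r0 :: rest).length := ⟨by omega, by exact_mod_cast hyn⟩
    have hxI : (0:Int) ≤ ↑xn ∧ (↑xn:Int) < ↑r0.length := ⟨by omega, by exact_mod_cast hxn⟩
    have Hb := H ↑yn hyI ↑xn hxI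
    rw [if_pos (show ((0:Int) ≤ ↑yn ∧ (↑yn:Int) < ↑(r0 :: rest).length) ∧ (0:Int) ≤ ↑xn ∧ (↑xn:Int) < ↑r0.length from ⟨hyI, hxI⟩),
      pvPix_eq_pixN (r0 :: rest) ↑yn ↑xn (by omega) (by omega)] at Hb
    simp only [Int.toNat_natCast] at Hb
    rw [if_neg hb] at Hb
    simp only [Bool.and_eq_true] at Hb
    obtain ⟨H1, H2, H3, H4, -⟩ := Hb
    refine ⟨?_, ?_, ?_, ?_⟩
    · intro h0
      rw [if_pos (show (0:Int) ≤ ↑xn - 1 ∧ (↑xn:Int) - 1 < ↑r0.length ∧ (0:Int) ≤ ↑yn ∧ (↑yn:Int) < ↑(r0 :: rest).length from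
            ⟨by omega, by omega, hyI.1, hyI.2⟩),
        if_pos (show ((0:Int) ≤ ↑yn ∧ (↑yn:Int) < ↑(r0 :: rest).length) ∧ (0:Int) ≤ ↑xn - 1 ∧ (↑xn:Int) - 1 < ↑r0.length from
            ⟨hyI, by omega, by omega⟩),
        pvPix_eq_pixN (r0 :: rest) ↑yn (↑xn - 1) (by omega) (by omega),
        show ((xn : Int) - 1).toNat = xn - 1 from by omega] at H1
      simp only [Int.toNat_natCast] at H1
      by_cases hB : pvPixN (r0 :: rest) yn (xn - 1) = [0, 0, 0]
      · exact Or.inl hB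
      · rw [if_neg hB] at H1
        simp only [Bool.not_eq_true', decide_eq_false_iff_not] at H1
        exact Or.inr H1
    · intro h1
      rw [if_pos (show (0:Int) ≤ ↑xn + 1 ∧ (↑xn:Int) + 1 < ↑r0.length ∧ (0:Int) ≤ ↑yn ∧ (↑yn:Int) < ↑(r0 :: rest).length from
            ⟨by omega, by omega, hyI.1, hyI.2⟩),
        if_pos (show ((0:Int) ≤ ↑yn ∧ (↑yn:Int) < ↑(r0 :: rest).length) ∧ (0:Int) ≤ ↑xn + 1 ∧ (↑xn:Int) + 1 < ↑r0.length from
            ⟨hyI, by omega, by omega⟩),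
        pvPix_eq_pixN (r0 :: rest) ↑yn (↑xn + 1) (by omega) (by omega),
        show ((xn : Int) + 1).toNat = xn + 1 from by omega] at H2
      simp only [Int.toNat_natCast] at H2
      by_cases hB : pvPixN (r0 :: rest) yn (xn + 1) = [0, 0, 0]
      · exact Or.inl hB
      · rw [if_neg hB] at H2
        simp only [Bool.not_eq_true', decide_eq_false_iff_not] at H2
        exact Or.inr H2
    · intro h0
      rw [if_pos (show (0:Int) ≤ ↑xn ∧ (↑xn:Int) < ↑r0.length ∧ (0:Int) ≤ ↑yn - 1 ∧ (↑yn:Int) - 1 < ↑(r0 :: rest).length from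
            ⟨hxI.1, hxI.2, by omega, by omega⟩),
        if_pos (show ((0:Int) ≤ ↑yn - 1 ∧ (↑yn:Int) - 1 < ↑(r0 :: rest).length) ∧ (0:Int) ≤ ↑xn ∧ (↑xn:Int) < ↑r0.length from
            ⟨⟨by omega, by omega⟩, hxI.1, hxI.2⟩),
        pvPix_eq_pixN (r0 :: rest) (↑yn - 1) ↑xn (by omega) (by omega),
        show ((yn : Int) - 1).toNat = yn - 1 from by omega] at H3
      simp only [Int.toNat_natCast] at H3
      by_cases hB : pvPixN (r0 :: rest) (yn - 1) xn = [0, 0, 0]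
      · exact Or.inl hB
      · rw [if_neg hB] at H3
        simp only [Bool.not_eq_true', decide_eq_false_iff_not] at H3
        exact Or.inr H3
    · intro h1
      rw [if_pos (show (0:Int) ≤ ↑xn ∧ (↑xn:Int) < ↑r0.length ∧ (0:Int) ≤ ↑yn + 1 ∧ (↑yn:Int) + 1 < ↑(r0 :: rest).length from
            ⟨hxI.1, hxI.2, by omega, by omega⟩),
        if_pos (show ((0:Int) ≤ ↑yn + 1 ∧ (↑yn:Int) + 1 < ↑(r0 :: rest).length) ∧ (0:Int) ≤ ↑xn ∧ (↑xn:Int) < ↑r0.length from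
            ⟨⟨by omega, by omega⟩, hxI.1, hxI.2⟩),
        pvPix_eq_pixN (r0 :: rest) (↑yn + 1) ↑xn (by omega) (by omega),
        show ((yn : Int) + 1).toNat = yn + 1 from by omega] at H4
      simp only [Int.toNat_natCast] at H4
      by_cases hB : pvPixN (r0 :: rest) (yn + 1) xn = [0, 0, 0]
      · exact Or.inl hB
      · rw [if_neg hB] at H4
        simp only [Bool.not_eq_true', decide_eq_false_iff_not] at H4
        exact Or.inr H4
  · intro H y hy x hx
    obtain ⟨yn, rfl⟩ : ∃ n : Nat, y = ↑n := ⟨y.toNat, by omega⟩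
    obtain ⟨xn, rfl⟩ : ∃ n : Nat, x = ↑n := ⟨x.toNat, by omega⟩
    have hyn : yn < (r0 :: rest).length := by exact_mod_cast hy.2
    have hxn : xn < r0.length := by exact_mod_cast hx.2
    rw [if_pos (show ((0:Int) ≤ ↑yn ∧ (↑yn:Int) < ↑(r0 :: rest).length) ∧ (0:Int) ≤ ↑xn ∧ (↑xn:Int) < ↑r0.length from ⟨hy, hx⟩),
      pvPix_eq_pixN (r0 :: rest) ↑yn ↑xn (by omega) (by omega)]
    simp only [Int.toNat_natCast]
    by_cases hb : pvPixN (r0 :: rest) yn xn = [0, 0, 0]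
    · rw [if_pos hb]
    · rw [if_neg hb]
      obtain ⟨A1, A2, A3, A4⟩ := H yn hyn xn hxn hb
      simp only [Bool.and_eq_true]
      refine ⟨?_, ?_, ?_, ?_, trivial⟩
      · by_cases hc : (0:Int) ≤ ↑xn - 1 ∧ (↑xn:Int) - 1 < ↑r0.length ∧ (0:Int) ≤ ↑yn ∧ (↑yn:Int) < ↑(r0 :: rest).length
        · obtain ⟨hc1, hc2, hc3, hc4⟩ := hc
          rw [if_pos (show (0:Int) ≤ ↑xn - 1 ∧ (↑xn:Int) - 1 < ↑r0.length ∧ (0:Int) ≤ ↑yn ∧ (↑yn:Int) < ↑(r0 :: rest).length from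
                ⟨hc1, hc2, hc3, hc4⟩),
            if_pos (show ((0:Int) ≤ ↑yn ∧ (↑yn:Int) < ↑(r0 :: rest).length) ∧ (0:Int) ≤ ↑xn - 1 ∧ (↑xn:Int) - 1 < ↑r0.length from
                ⟨⟨hc3, hc4⟩, hc1, hc2⟩),
            pvPix_eq_pixN (r0 :: rest) ↑yn (↑xn - 1) (by omega) (by omega),
            show ((xn : Int) - 1).toNat = xn - 1 from by omega]
          simp only [Int.toNat_natCast]
          rcases A1 (by omega) with hB | hne
          · rw [if_pos hB]
          · by_cases hB : pvPixN (r0 :: rest) yn (xn - 1) = [0, 0, 0]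
            · rw [if_pos hB]
            · rw [if_neg hB]
              simp only [Bool.not_eq_true', decide_eq_false_iff_not]
              exact hne
        · rw [if_neg hc]
      · by_cases hc : (0:Int) ≤ ↑xn + 1 ∧ (↑xn:Int) + 1 < ↑r0.length ∧ (0:Int) ≤ ↑yn ∧ (↑yn:Int) < ↑(r0 :: rest).length
        · obtain ⟨hc1, hc2, hc3, hc4⟩ := hc
          rw [if_pos (show (0:Int) ≤ ↑xn + 1 ∧ (↑xn:Int) + 1 < ↑r0.length ∧ (0:Int) ≤ ↑yn ∧ (↑yn:Int) < ↑(r0 :: rest).length from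
                ⟨hc1, hc2, hc3, hc4⟩),
            if_pos (show ((0:Int) ≤ ↑yn ∧ (↑yn:Int) < ↑(r0 :: rest).length) ∧ (0:Int) ≤ ↑xn + 1 ∧ (↑xn:Int) + 1 < ↑r0.length from
                ⟨⟨hc3, hc4⟩, hc1, hc2⟩),
            pvPix_eq_pixN (r0 :: rest) ↑yn (↑xn + 1) (by omega) (by omega),
            show ((xn : Int) + 1).toNat = xn + 1 from by omega]
          simp only [Int.toNat_natCast]
          rcases A2 (by omega) with hB | hne
          · rw [if_pos hB]
          · by_cases hB : pvPixN (r0 :: rest) yn (xn + 1) = [0, 0, 0]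
            · rw [if_pos hB]
            · rw [if_neg hB]
              simp only [Bool.not_eq_true', decide_eq_false_iff_not]
              exact hne
        · rw [if_neg hc]
      · by_cases hc : (0:Int) ≤ ↑xn ∧ (↑xn:Int) < ↑r0.length ∧ (0:Int) ≤ ↑yn - 1 ∧ (↑yn:Int) - 1 < ↑(r0 :: rest).length
        · obtain ⟨hc1, hc2, hc3, hc4⟩ := hc
          rw [if_pos (show (0:Int) ≤ ↑xn ∧ (↑xn:Int) < ↑r0.length ∧ (0:Int) ≤ ↑yn - 1 ∧ (↑yn:Int) - 1 < ↑(r0 :: rest).length from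
                ⟨hc1, hc2, hc3, hc4⟩),
            if_pos (show ((0:Int) ≤ ↑yn - 1 ∧ (↑yn:Int) - 1 < ↑(r0 :: rest).length) ∧ (0:Int) ≤ ↑xn ∧ (↑xn:Int) < ↑r0.length from
                ⟨⟨hc3, hc4⟩, hc1, hc2⟩),
            pvPix_eq_pixN (r0 :: rest) (↑yn - 1) ↑xn (by omega) (by omega),
            show ((yn : Int) - 1).toNat = yn - 1 from by omega]
          simp only [Int.toNat_natCast]
          rcases A3 (by omega) with hB | hne
          · rw [if_pos hB]
          · by_cases hB : pvPixN (r0 :: rest) (yn - 1) xn = [0, 0, 0]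
            · rw [if_pos hB]
            · rw [if_neg hB]
              simp only [Bool.not_eq_true', decide_eq_false_iff_not]
              exact hne
        · rw [if_neg hc]
      · by_cases hc : (0:Int) ≤ ↑xn ∧ (↑xn:Int) < ↑r0.length ∧ (0:Int) ≤ ↑yn + 1 ∧ (↑yn:Int) + 1 < ↑(r0 :: rest).length
        · obtain ⟨hc1, hc2, hc3, hc4⟩ := hc
          rw [if_pos (show (0:Int) ≤ ↑xn ∧ (↑xn:Int) < ↑r0.length ∧ (0:Int) ≤ ↑yn + 1 ∧ (↑yn:Int) + 1 < ↑(r0 :: rest).length from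
                ⟨hc1, hc2, hc3, hc4⟩),
            if_pos (show ((0:Int) ≤ ↑yn + 1 ∧ (↑yn:Int) + 1 < ↑(r0 :: rest).length) ∧ (0:Int) ≤ ↑xn ∧ (↑xn:Int) < ↑r0.length from
                ⟨⟨hc3, hc4⟩, hc1, hc2⟩),
            pvPix_eq_pixN (r0 :: rest) (↑yn + 1) ↑xn (by omega) (by omega),
            show ((yn : Int) + 1).toNat = yn + 1 from by omega]
          simp only [Int.toNat_natCast]
          rcases A4 (by omega) with hB | hne
          · rw [if_pos hB]
          · by_cases hB : pvPixN (r0 :: rest) (yn + 1) xn = [0, 0, 0]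
            · rw [if_pos hB]
            · rw [if_neg hB]
              simp only [Bool.not_eq_true', decide_eq_false_iff_not]
              exact hne
        · rw [if_neg hc]

-- B true ↔ no indexed pixel has a same-colored right or down neighbour in the index
lemma pvB_iff (r0 : List (List Int)) (rest : List (List (List Int)))
    (adj : Option (List (String × List Int))) :
    (validate_four_color_theorem_alt (r0 :: rest) adj = true ↔
      ∀ t, pvMemT (r0 :: rest) r0.length t →
        ¬ pvMemT (r0 :: rest) r0.length (t.1, t.2.1 + 1, t.2.2) ∧
        ¬ pvMemT (r0 :: rest) r0.length (t.1, t.2.1, t.2.2 + 1)) := by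
  have hh : (r0 :: rest).length ≠ 0 := by simp
  simp only [validate_four_color_theorem_alt]
  rw [if_neg hh]
  simp only [PySem.List.pyGetD_ofNat', List.getD_cons_zero, List.all_eq_true,
    Bool.and_eq_true, Bool.not_eq_true', PySem.Set.contains_eq_listContains,
    List.contains_eq_mem, decide_eq_false_iff_not]
  constructor
  · intro H t ht
    exact H t ((pvMem_colored r0 rest t).2 ht) |>.imp
      (fun h => fun hc => h ((pvMem_colored r0 rest _).2 hc))
      (fun h => fun hc => h ((pvMem_colored r0 rest _).2 hc))
  · intro H t ht
    have := H t ((pvMem_colored r0 rest t).1 ht)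
    exact ⟨fun hc => this.1 ((pvMem_colored r0 rest _).1 hc),
      fun hc => this.2 ((pvMem_colored r0 rest _).1 hc)⟩

-- B's membership condition is exactly "no bad horizontal pair and no bad vertical pair"
lemma pvB_iff_HV (r0 : List (List Int)) (rest : List (List (List Int))) :
    (∀ t, pvMemT (r0 :: rest) r0.length t →
        ¬ pvMemT (r0 :: rest) r0.length (t.1, t.2.1 + 1, t.2.2) ∧
        ¬ pvMemT (r0 :: rest) r0.length (t.1, t.2.1, t.2.2 + 1)) ↔
      (pvPropH (r0 :: rest) r0.length ∧ pvPropV (r0 :: rest) r0.length) := by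
  set m := r0 :: rest with hm
  set w := r0.length with hw
  constructor
  · intro H
    constructor
    · intro y hy x hx
      by_cases hb : pvPixN m y x = [0, 0, 0]
      · exact Or.inl hb
      by_cases hb' : pvPixN m y (x + 1) = [0, 0, 0]
      · exact Or.inr (Or.inl hb')
      refine Or.inr (Or.inr fun he => ?_)
      have h1 : pvMemT m w (pvPixN m y x, (x : Int), (y : Int)) :=
        ⟨y, x, hy, by omega, hb, rfl⟩
      have h2 := (H _ h1).1
      exact h2 ⟨y, x + 1, hy, hx, hb', by rw [← he]; push_cast; rfl⟩
    · intro y hy x hx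
      by_cases hb : pvPixN m y x = [0, 0, 0]
      · exact Or.inl hb
      by_cases hb' : pvPixN m (y + 1) x = [0, 0, 0]
      · exact Or.inr (Or.inl hb')
      refine Or.inr (Or.inr fun he => ?_)
      have h1 : pvMemT m w (pvPixN m y x, (x : Int), (y : Int)) :=
        ⟨y, x, by omega, hx, hb, rfl⟩
      have h2 := (H _ h1).2
      exact h2 ⟨y + 1, x, hy, hx, hb', by rw [← he]; push_cast; rfl⟩
  · rintro ⟨hH, hV⟩ t ⟨yn, xn, hyh, hxw, hne, rfl⟩
    constructor
    · rintro ⟨yn', xn', hyh', hxw', hne', heq⟩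
      simp only [Prod.mk.injEq] at heq
      obtain ⟨hc, hx', hy'⟩ := heq
      have hxn' : xn' = xn + 1 := by omega
      have hyn' : yn' = yn := by omega
      rcases hH yn hyh xn (by omega) with h | h | h
      · exact hne h
      · exact hne' (by rw [hxn', hyn']; exact h)
      · exact h (hc.trans (by rw [hxn', hyn']))
    · rintro ⟨yn', xn', hyh', hxw', hne', heq⟩
      simp only [Prod.mk.injEq] at heq
      obtain ⟨hc, hx', hy'⟩ := heq
      have hxn' : xn' = xn := by omega
      have hyn' : yn' = yn + 1 := by omega
      rcases hV yn (by omega) xn hxw with h | h | h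
      · exact hne h
      · exact hne' (by rw [hxn', hyn']; exact h)
      · exact h (hc.trans (by rw [hxn', hyn']))

lemma pvA_iff_HV (m : List (List (List Int))) (w : Nat) :
    pvPropA m w ↔ pvPropH m w ∧ pvPropV m w := by
  constructor
  · intro H
    constructor
    · intro y hy x hx
      by_cases hb : pvPixN m y x = [0, 0, 0]
      · exact Or.inl hb
      · have := ((H y hy x (by omega) hb).2.1 hx)
        exact Or.inr this
    · intro y hy x hx
      by_cases hb : pvPixN m y x = [0, 0, 0]
      · exact Or.inl hb
      · have := (H y (by omega) x hx hb).2.2.2 hy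
        exact Or.inr this
  · rintro ⟨hH, hV⟩ y hy x hx hb
    refine ⟨?_, ?_, ?_, ?_⟩
    · intro hx0
      have hxx : x - 1 + 1 = x := Nat.sub_add_cancel hx0
      have h1 := hH y hy (x - 1) (by omega)
      rw [hxx] at h1
      rcases h1 with h | h | h
      · exact Or.inl h
      · exact absurd h hb
      · exact Or.inr fun he => h he.symm
    · intro hx1
      rcases hH y hy x hx1 with h | h | h
      · exact absurd h hb
      · exact Or.inl h
      · exact Or.inr h
    · intro hy0
      have := hV (y - 1) (by omega) x hx
      have hyy : y - 1 + 1 = y := Nat.sub_add_cancel hy0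
      rw [hyy] at this
      rcases this with h | h | h
      · exact Or.inl h
      · exact absurd h hb
      · exact Or.inr (Ne.symm h)
    · intro hy1
      rcases hV y hy1 x hx with h | h | h
      · exact absurd h hb
      · exact Or.inl h
      · exact Or.inr h

-- ===== VERDICT (by name: the statement is the Claim_ definition above) =====
theorem validate_four_color_theorem_spec : Claim_equal_validate_four_color_theorem := by
  intro m adj _ hpre
  unfold Spec_validate_four_color_theorem
  cases m with
  | nil => rfl
  | cons r0 rest =>
    rw [Bool.eq_iff_iff, pvA_iff r0 rest adj hpre, pvB_iff r0 rest adj,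
      pvB_iff_HV, pvA_iff_HV]
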